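-- pv_equiv track=rewrite | github.com/AdamZhouSE/pythonHomework | Code/CodeRecords/2615/61053/272296.py | f
-- ===== SOURCE A (Python) =====
-- def f(str):
--     str = str[::-1]
--     ans = ""
--     tempstring = str[0]
--     former_delta = ord(str[1]) - ord(str[0])
--     for i in range(1,len(str)):
--         delta = ord(str[i]) - ord(str[i-1])
--         if delta<0 and delta == former_delta:
--             tempstring += str[i]
--             continue
--         if len(tempstring) > len(ans) or (len(tempstring) == len(ans) and tempstring[0] > ans[0]):
--             ans = tempstring
--         if delta >= 0:
--             tempstring = str[i]
--         else:
--             tempstring = str[i-1:i+1]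
--             former_delta = delta
--     if len(tempstring) > len(ans) or (len(tempstring) == len(ans) and tempstring[0] > ans[0]):
--         ans = tempstring
--     return ans
-- ===== SOURCE B (Python) =====
-- def f(str):
--     rev = str[::-1]
--     n = len(rev)
--     # stage 1: the adjacent-delta list of the reversed string
--     d = [ord(rev[k + 1]) - ord(rev[k]) for k in range(n - 1)]
--     # stage 2: group d into maximal runs of one equal value; keep the descending ones
--     starts = [k for k in range(n - 1) if k == 0 or d[k] != d[k - 1]]
--     ends = starts[1:] + [n - 1]
--     runs = [(a, rev[a:e + 1]) for a, e in zip(starts, ends) if d[a] < 0]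
--     # stage 3: single-character candidates at every position no descending run passes through
--     singles = [(i, rev[i]) for i in range(n) if i + 1 == n or d[i] >= 0]
--     # stage 4: order all candidates by start position and reduce, earliest wins exact ties
--     best = ""
--     for _, c in sorted(runs + singles, key=lambda p: p[0]):
--         if len(c) > len(best) or (len(c) == len(best) and c[0] > best[0]):
--             best = c
--     return best
-- ===== Notes on version B (the rewrite author's own statement) =====
-- stated objective: alternative
-- what changed: A's single-pass state machine over (ans, tempstring, former_delta) with flush-on-break is replaced by staged passes: materialise the adjacent-delta list of the reversed string, group it into maximal equal-value runs via a boundary-index list, build the descending-run and single-character candidate lists separately, sort all candidates by start position and reduce with a keep-best fold on (length, first char).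
import Mathlib
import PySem

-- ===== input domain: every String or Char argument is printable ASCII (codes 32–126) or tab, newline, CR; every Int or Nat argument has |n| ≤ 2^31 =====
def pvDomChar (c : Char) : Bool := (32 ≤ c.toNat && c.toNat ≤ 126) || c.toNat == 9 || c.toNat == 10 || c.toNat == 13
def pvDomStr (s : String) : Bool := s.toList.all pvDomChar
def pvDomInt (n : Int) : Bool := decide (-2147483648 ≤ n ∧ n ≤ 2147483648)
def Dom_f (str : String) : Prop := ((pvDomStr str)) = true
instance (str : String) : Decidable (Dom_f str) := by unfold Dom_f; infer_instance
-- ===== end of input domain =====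

-- B replaces A's one-pass state machine (ans/tempstring/former_delta with flush-on-break) by
-- staged passes: materialise the adjacent-delta list of the reversed string, group it into
-- maximal equal-value runs, build the descending-run and single-character candidates as lists,
-- sort them by start position and reduce; same cost, different decomposition ("alternative").

-- ===== PORT A =====
-- 'if len(tempstring) > len(ans) or (len(tempstring) == len(ans) and tempstring[0] > ans[0]): ans = tempstring'
-- (the headD default is never compared on reachable states: tempstring is always nonempty)
def pvFlushA (ans temp : List Char) : List Char :=
  if temp.length > ans.length ∨ (temp.length = ans.length ∧ ans.headD ' ' < temp.headD ' ') then temp else ans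

-- 'for i in range(1, len(str)): …' with state (ans, tempstring, former_delta); indices are in range
def pvLoopA (l : List Char) (ans temp : List Char) (former : Int) (i : Nat) :
    List Char × List Char × Int :=
  if h : i < l.length then
    let delta : Int := ((PySem.List.pyGetD l (i : Int) ' ').toNat : Int)
      - ((PySem.List.pyGetD l ((i : Int) - 1) ' ').toNat : Int)
    if delta < 0 ∧ delta = former then
      pvLoopA l ans (temp ++ [PySem.List.pyGetD l (i : Int) ' ']) former (i + 1)
    else
      let ans' := pvFlushA ans temp
      if delta ≥ 0 then
        pvLoopA l ans' [PySem.List.pyGetD l (i : Int) ' '] former (i + 1)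
      else
        pvLoopA l ans' (PySem.List.slice l (some ((i : Int) - 1)) (some ((i : Int) + 1))) delta (i + 1)
  else (ans, temp, former)
termination_by l.length - i

def f (str : String) : String :=
  let l := ((PySem.Str.slice? str none none (-1)).getD "").toList  -- str = str[::-1] (never raises)
  if l.length < 2 then ""  -- Python raises IndexError on str[0] / str[1]; excluded by Pre_f
  else
    let temp0 := [PySem.List.pyGetD l 0 ' ']                      -- tempstring = str[0]
    let former0 : Int := ((PySem.List.pyGetD l 1 ' ').toNat : Int)
      - ((PySem.List.pyGetD l 0 ' ').toNat : Int)                 -- former_delta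
    let r := pvLoopA l [] temp0 former0 1
    String.ofList (pvFlushA r.1 r.2.1)                            -- final flush, return ans

-- ===== PORT B =====
def f_alt (str : String) : String :=
  let rev := ((PySem.Str.slice? str none none (-1)).getD "").toList  -- rev = str[::-1]
  let n : Nat := rev.length
  -- d = [ord(rev[k+1]) - ord(rev[k]) for k in range(n-1)]
  let d : List Int := (PySem.List.pyRange 0 ((n : Int) - 1) 1).map (fun k =>
      ((PySem.List.pyGetD rev (k + 1) ' ').toNat : Int) - ((PySem.List.pyGetD rev k ' ').toNat : Int))
  -- starts = [k for k in range(n-1) if k == 0 or d[k] != d[k-1]]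
  let starts : List Int := (PySem.List.pyRange 0 ((n : Int) - 1) 1).filter (fun k =>
      decide (k = 0 ∨ PySem.List.pyGetD d k 0 ≠ PySem.List.pyGetD d (k - 1) 0))
  -- ends = starts[1:] + [n-1]
  let ends : List Int := starts.drop 1 ++ [(n : Int) - 1]
  -- runs = [(a, rev[a:e+1]) for a, e in zip(starts, ends) if d[a] < 0]
  let runs : List (Int × List Char) :=
    ((starts.zip ends).filter (fun p => decide (PySem.List.pyGetD d p.1 0 < 0))).map
      (fun p => (p.1, PySem.List.slice rev (some p.1) (some (p.2 + 1))))
  -- singles = [(i, rev[i]) for i in range(n) if i + 1 == n or d[i] >= 0]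
  let singles : List (Int × List Char) :=
    ((PySem.List.pyRange 0 (n : Int) 1).filter (fun i =>
        decide (i + 1 = (n : Int) ∨ 0 ≤ PySem.List.pyGetD d i 0))).map
      (fun i => (i, [PySem.List.pyGetD rev i ' ']))
  -- for _, c in sorted(runs + singles, key=...): 'if len(c) > len(best) or (len(c) == len(best)
  -- and c[0] > best[0]): best = c'
  String.ofList ((PySem.List.sorted (runs ++ singles) (fun p => p.1) false).foldl
      (fun best p =>
        if p.2.length > best.length ∨ (p.2.length = best.length ∧ best.headD ' ' < p.2.headD ' ')
        then p.2 else best) [])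

-- ===== PRECONDITION & SPEC =====
-- A indexes str[0] and str[1] unconditionally, so it raises IndexError on strings of length < 2.
def Pre_f (str : String) : Prop := 2 ≤ str.toList.length
instance (str : String) : Decidable (Pre_f str) := by unfold Pre_f; infer_instance
def pvWitness_f : String := "ba"

def Spec_f (str : String) (out : String) : Prop := out = f_alt str
instance (str : String) (out : String) : Decidable (Spec_f str out) := by unfold Spec_f; infer_instance

-- ===== CLAIM (what is proved, stated in full; the proofs are below) =====
def Claim_equal_f : Prop := ∀ (str : String), Dom_f str → Pre_f str → Spec_f str (f str)

-- ===== LEMMAS AND PROOFS =====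

-- proof-only abbreviations: rev[i] and the delta at i
def pvG (l : List Char) (i : Nat) : Char := l.getD i ' '
def pvD (l : List Char) (i : Nat) : Int := ((pvG l i).toNat : Int) - ((pvG l (i - 1)).toNat : Int)

-- A's remaining computation from a given state, including the final flush
def pvF (l : List Char) (ans temp : List Char) (former : Int) (i : Nat) : List Char :=
  (fun r => pvFlushA r.1 r.2.1) (pvLoopA l ans temp former i)

theorem pvChar_lt_iff (a b : Char) : a < b ↔ a.toNat < b.toNat := by
  rw [Char.lt_def, UInt32.lt_iff_toNat_lt]; rfl

theorem pvFlushA_len2 (ans temp : List Char) (h : 2 ≤ temp.length) :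
    2 ≤ (pvFlushA ans temp).length := by
  unfold pvFlushA; split_ifs with hc
  · exact h
  · have : ¬ (temp.length > ans.length) := fun hgt => hc (Or.inl hgt)
    omega

theorem pvFlushA_absorb1 (x : List Char) (c : Char) (h : 2 ≤ x.length) :
    pvFlushA x [c] = x := by
  unfold pvFlushA
  rw [if_neg]
  rintro (h1 | ⟨h2, _⟩) <;> simp_all <;> omega

theorem pvFlushA_big (x r : List Char) (hx : x.length < r.length) : pvFlushA x r = r := by
  unfold pvFlushA; rw [if_pos (Or.inl hx)]

theorem pvFlushA_single_then_big (acc r : List Char) (c : Char) (h : 2 ≤ r.length) :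
    pvFlushA (pvFlushA acc [c]) r = pvFlushA acc r := by
  by_cases hacc : 2 ≤ acc.length
  · rw [pvFlushA_absorb1 acc c hacc]
  · have hX : (pvFlushA acc [c]).length ≤ 1 := by
      unfold pvFlushA; split_ifs
      · simp
      · omega
    rw [pvFlushA_big _ _ (by omega), pvFlushA_big _ _ (by omega)]

-- index/cast bridges
theorem pvGetD_cast (l : List Char) (i : Nat) :
    PySem.List.pyGetD l (i : Int) ' ' = pvG l i := by
  rw [PySem.List.pyGetD_natCast]; rfl

theorem pvGetD_cast_sub (l : List Char) (i : Nat) (h : 1 ≤ i) :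
    PySem.List.pyGetD l ((i : Int) - 1) ' ' = pvG l (i - 1) := by
  rw [show ((i : Int) - 1) = ((i - 1 : Nat) : Int) by omega, PySem.List.pyGetD_natCast]
  rfl

theorem pvGetD_cast_add (l : List Char) (i : Nat) :
    PySem.List.pyGetD l ((i : Int) + 1) ' ' = pvG l (i + 1) := by
  rw [show ((i : Int) + 1) = ((i + 1 : Nat) : Int) by omega, PySem.List.pyGetD_natCast]
  rfl

theorem pvSlice_pair (l : List Char) (i : Nat) (h1 : 1 ≤ i) (h : i < l.length) :
    PySem.List.slice l (some ((i : Int) - 1)) (some ((i : Int) + 1))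
      = [pvG l (i - 1), pvG l i] := by
  rw [show ((i : Int) - 1) = ((i - 1 : Nat) : Int) by omega,
      show ((i : Int) + 1) = ((i + 1 : Nat) : Int) by omega,
      PySem.List.slice_natCast]
  rw [List.drop_eq_getElem_cons (by omega)]
  rw [show i - 1 + 1 = i by omega]
  rw [List.drop_eq_getElem_cons (by omega)]
  rw [show i + 1 - (i - 1) = 2 by omega]
  rw [show pvG l (i - 1) = l[i - 1] from List.getD_eq_getElem l ' ' (by omega),
      show pvG l i = l[i] from List.getD_eq_getElem l ' ' h]
  rfl

-- unfolding lemmas for pvF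
theorem pvF_end (l ans temp : List Char) (former : Int) (i : Nat) (h : l.length ≤ i) :
    pvF l ans temp former i = pvFlushA ans temp := by
  unfold pvF pvLoopA; rw [dif_neg (by omega)]

theorem pvF_cont (l ans temp : List Char) (former : Int) (i : Nat)
    (h1 : 1 ≤ i) (h : i < l.length) (hd : pvD l i < 0) (he : pvD l i = former) :
    pvF l ans temp former i = pvF l ans (temp ++ [pvG l i]) former (i + 1) := by
  unfold pvF
  conv_lhs => rw [pvLoopA]
  rw [dif_pos h]
  simp only [pvGetD_cast, pvGetD_cast_sub l i h1]
  rw [show ((pvG l i).toNat : Int) - ((pvG l (i - 1)).toNat : Int) = pvD l i from rfl]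
  rw [if_pos (show pvD l i < 0 ∧ pvD l i = former from ⟨hd, he⟩)]

theorem pvF_break_ge (l ans temp : List Char) (former : Int) (i : Nat)
    (h1 : 1 ≤ i) (h : i < l.length) (hd : 0 ≤ pvD l i) :
    pvF l ans temp former i = pvF l (pvFlushA ans temp) [pvG l i] former (i + 1) := by
  unfold pvF
  conv_lhs => rw [pvLoopA]
  rw [dif_pos h]
  simp only [pvGetD_cast, pvGetD_cast_sub l i h1]
  rw [show ((pvG l i).toNat : Int) - ((pvG l (i - 1)).toNat : Int) = pvD l i from rfl]
  rw [if_neg (show ¬(pvD l i < 0 ∧ pvD l i = former) by omega)]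
  rw [if_pos (show pvD l i ≥ 0 from hd)]

theorem pvF_break_neg (l ans temp : List Char) (former : Int) (i : Nat)
    (h1 : 1 ≤ i) (h : i < l.length) (hd : pvD l i < 0) (he : pvD l i ≠ former) :
    pvF l ans temp former i
      = pvF l (pvFlushA ans temp) [pvG l (i - 1), pvG l i] (pvD l i) (i + 1) := by
  unfold pvF
  conv_lhs => rw [pvLoopA]
  rw [dif_pos h]
  simp only [pvGetD_cast, pvGetD_cast_sub l i h1]
  rw [show ((pvG l i).toNat : Int) - ((pvG l (i - 1)).toNat : Int) = pvD l i from rfl]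
  rw [if_neg (show ¬(pvD l i < 0 ∧ pvD l i = former) by tauto)]
  rw [if_neg (show ¬(pvD l i ≥ 0) by omega)]
  rw [pvSlice_pair l i h1 h]

-- the chain form of A's scan (proof-side bridge between A and the canonical candidate list)
def pvRunB (l : List Char) (d : Int) (cand : List Char) (j : Nat) : List Char × Nat :=
  if h : j + 1 < l.length then
    if ((PySem.List.pyGetD l ((j : Int) + 1) ' ').toNat : Int)
        - ((PySem.List.pyGetD l (j : Int) ' ').toNat : Int) = d then
      pvRunB l d (cand ++ [PySem.List.pyGetD l ((j : Int) + 1) ' ']) (j + 1)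
    else (cand, j)
  else (cand, j)
termination_by l.length - j

-- the scan only moves forward (cited by pvLoopB's termination proof)
theorem pvRunB_le (l : List Char) (d : Int) (cand : List Char) (j : Nat) :
    j ≤ (pvRunB l d cand j).2 := by
  fun_induction pvRunB l d cand j with
  | case1 _ _ _ _ ih => omega
  | case2 => simp
  | case3 => simp

def pvLoopB (l : List Char) (best : List Char) (i : Nat) : List Char :=
  if h : i < l.length then
    if hc : i + 1 < l.length ∧ PySem.List.pyGetD l ((i : Int) + 1) ' ' < PySem.List.pyGetD l (i : Int) ' ' then
      pvLoopB l
        (pvFlushA best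
          (pvRunB l (((PySem.List.pyGetD l ((i : Int) + 1) ' ').toNat : Int) - ((PySem.List.pyGetD l (i : Int) ' ').toNat : Int))
            [PySem.List.pyGetD l (i : Int) ' ', PySem.List.pyGetD l ((i : Int) + 1) ' '] (i + 1)).1)
        (pvRunB l (((PySem.List.pyGetD l ((i : Int) + 1) ' ').toNat : Int) - ((PySem.List.pyGetD l (i : Int) ' ').toNat : Int))
          [PySem.List.pyGetD l (i : Int) ' ', PySem.List.pyGetD l ((i : Int) + 1) ' '] (i + 1)).2
    else
      pvLoopB l (pvFlushA best [PySem.List.pyGetD l (i : Int) ' ']) (i + 1)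
  else best
termination_by l.length - i
decreasing_by
  · have := pvRunB_le l
      (((PySem.List.pyGetD l ((i : Int) + 1) ' ').toNat : Int) - ((PySem.List.pyGetD l (i : Int) ' ').toNat : Int))
      [PySem.List.pyGetD l (i : Int) ' ', PySem.List.pyGetD l ((i : Int) + 1) ' '] (i + 1)
    omega
  · omega

-- unfolding lemmas for pvRunB / pvLoopB
theorem pvRunB_cont (l : List Char) (d : Int) (cand : List Char) (j : Nat)
    (h : j + 1 < l.length) (he : pvD l (j + 1) = d) :
    pvRunB l d cand j = pvRunB l d (cand ++ [pvG l (j + 1)]) (j + 1) := by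
  conv_lhs => rw [pvRunB]
  rw [dif_pos h]
  simp only [pvGetD_cast, pvGetD_cast_add]
  rw [show ((pvG l (j + 1)).toNat : Int) - ((pvG l j).toNat : Int) = pvD l (j + 1) from rfl]
  rw [if_pos he]

theorem pvRunB_stop (l : List Char) (d : Int) (cand : List Char) (j : Nat)
    (h : ¬ (j + 1 < l.length ∧ pvD l (j + 1) = d)) :
    pvRunB l d cand j = (cand, j) := by
  conv_lhs => rw [pvRunB]
  by_cases hj : j + 1 < l.length
  · rw [dif_pos hj]
    simp only [pvGetD_cast, pvGetD_cast_add]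
    rw [show ((pvG l (j + 1)).toNat : Int) - ((pvG l j).toNat : Int) = pvD l (j + 1) from rfl]
    rw [if_neg (show ¬(pvD l (j + 1) = d) by tauto)]
  · rw [dif_neg hj]

theorem pvRunB_len (l : List Char) (d : Int) (cand : List Char) (j : Nat) :
    cand.length ≤ (pvRunB l d cand j).1.length := by
  fun_induction pvRunB l d cand j with
  | case1 _ _ _ _ ih => simp at ih ⊢; omega
  | case2 => simp
  | case3 => simp

theorem pvLoopB_end (l best : List Char) (i : Nat) (h : l.length ≤ i) :
    pvLoopB l best i = best := by
  unfold pvLoopB; rw [dif_neg (by omega)]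

theorem pvLoopB_cond (l : List Char) (i : Nat) :
    (i + 1 < l.length ∧ PySem.List.pyGetD l ((i : Int) + 1) ' ' < PySem.List.pyGetD l (i : Int) ' ')
      ↔ (i + 1 < l.length ∧ pvD l (i + 1) < 0) := by
  rw [pvGetD_cast, pvGetD_cast_add, pvChar_lt_iff]
  unfold pvD
  constructor
  · rintro ⟨ha, hb⟩; exact ⟨ha, by simp; omega⟩
  · rintro ⟨ha, hb⟩; refine ⟨ha, ?_⟩; simp at hb; omega

theorem pvLoopB_single (l best : List Char) (i : Nat) (h : i < l.length)
    (hc : ¬ (i + 1 < l.length ∧ pvD l (i + 1) < 0)) :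
    pvLoopB l best i = pvLoopB l (pvFlushA best [pvG l i]) (i + 1) := by
  conv_lhs => rw [pvLoopB]
  rw [dif_pos h, dif_neg (by rw [pvLoopB_cond]; exact hc)]
  rw [pvGetD_cast]

theorem pvLoopB_run (l best : List Char) (i : Nat) (h : i < l.length)
    (h2 : i + 1 < l.length) (hd : pvD l (i + 1) < 0) :
    pvLoopB l best i
      = pvLoopB l (pvFlushA best (pvRunB l (pvD l (i + 1)) [pvG l i, pvG l (i + 1)] (i + 1)).1)
          (pvRunB l (pvD l (i + 1)) [pvG l i, pvG l (i + 1)] (i + 1)).2 := by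
  conv_lhs => rw [pvLoopB]
  rw [dif_pos h, dif_pos (by rw [pvLoopB_cond]; exact ⟨h2, hd⟩)]
  simp only [pvGetD_cast, pvGetD_cast_add]
  rfl

-- the S-alignment at the very end of the string (used twice in pvMain)
theorem pvS_base (l acc : List Char) (former : Int) (h1 : 1 ≤ l.length) :
    pvF l acc [pvG l (l.length - 1)] former l.length = pvLoopB l acc (l.length - 1) := by
  rw [pvF_end l acc _ former l.length le_rfl]
  rw [pvLoopB_single l acc (l.length - 1) (by omega) (by omega)]
  rw [show l.length - 1 + 1 = l.length by omega]
  rw [pvLoopB_end l _ l.length le_rfl]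

-- the main simulation: Q aligns A's run state with the chain's inner scan, S aligns A's fresh
-- starts with the chain's outer loop
theorem pvMain (l : List Char) (k : Nat) :
    (∀ (j : Nat) (acc cand : List Char) (d : Int), l.length - j ≤ k → 1 ≤ j → j < l.length →
      d < 0 → 2 ≤ cand.length →
      pvF l acc cand d (j + 1)
        = pvLoopB l (pvFlushA acc (pvRunB l d cand j).1) (pvRunB l d cand j).2) ∧
    (∀ (i : Nat) (acc : List Char) (former : Int), l.length - i ≤ k → 1 ≤ i → i ≤ l.length →
      pvF l acc [pvG l (i - 1)] former i = pvLoopB l acc (i - 1)) := by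
  induction k with
  | zero =>
    constructor
    · intro j _ _ _ hk _ hj _ _; omega
    · intro i acc former hk h1 h2
      have hi : i = l.length := by omega
      subst hi
      exact pvS_base l acc former (by omega)
  | succ k ih =>
    obtain ⟨ihQ, ihS⟩ := ih
    have hQ : ∀ (j : Nat) (acc cand : List Char) (d : Int), l.length - j ≤ k + 1 → 1 ≤ j →
        j < l.length → d < 0 → 2 ≤ cand.length →
        pvF l acc cand d (j + 1)
          = pvLoopB l (pvFlushA acc (pvRunB l d cand j).1) (pvRunB l d cand j).2 := by
      intro j acc cand d hk h1 h2 hd hlen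
      by_cases hc : j + 1 < l.length ∧ pvD l (j + 1) = d
      · rw [pvRunB_cont l d cand j hc.1 hc.2]
        rw [pvF_cont l acc cand d (j + 1) (by omega) hc.1 (by omega) hc.2]
        exact ihQ (j + 1) acc (cand ++ [pvG l (j + 1)]) d (by omega) (by omega) hc.1 hd
          (by simp; omega)
      · rw [pvRunB_stop l d cand j hc]
        have hXlen : 2 ≤ (pvFlushA acc cand).length := pvFlushA_len2 acc cand hlen
        by_cases hj : j + 1 < l.length
        · have hne : pvD l (j + 1) ≠ d := fun he => hc ⟨hj, he⟩
          by_cases hdj : pvD l (j + 1) < 0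
          · rw [pvF_break_neg l acc cand d (j + 1) (by omega) hj hdj hne]
            rw [show j + 1 - 1 = j from rfl]
            rw [pvLoopB_run l (pvFlushA acc cand) j h2 hj hdj]
            exact ihQ (j + 1) (pvFlushA acc cand) [pvG l j, pvG l (j + 1)] (pvD l (j + 1))
              (by omega) (by omega) hj hdj (by simp)
          · rw [pvF_break_ge l acc cand d (j + 1) (by omega) hj (by omega)]
            have hs := ihS (j + 2) (pvFlushA acc cand) d (by omega) (by omega) (by omega)
            rw [show j + 2 - 1 = j + 1 from rfl] at hs
            rw [hs]
            rw [pvLoopB_single l (pvFlushA acc cand) j h2 (by tauto)]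
            rw [pvFlushA_absorb1 _ _ hXlen]
        · -- j + 1 = l.length
          rw [pvF_end l acc cand d (j + 1) (by omega)]
          rw [pvLoopB_single l (pvFlushA acc cand) j h2 (by omega)]
          rw [pvFlushA_absorb1 _ _ hXlen]
          rw [pvLoopB_end l _ (j + 1) (by omega)]
    refine ⟨hQ, ?_⟩
    intro i acc former hk h1 h2
    by_cases hi : i < l.length
    · have hei : i - 1 + 1 = i := by omega
      by_cases hdi : pvD l i < 0
      · -- B takes the run branch at i - 1
        have hrun := pvLoopB_run l acc (i - 1) (by omega) (by omega) (by rw [hei]; exact hdi)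
        rw [hei] at hrun
        rw [hrun]
        by_cases hf : pvD l i = former
        · rw [pvF_cont l acc [pvG l (i - 1)] former i h1 hi hdi hf]
          have := hQ i acc ([pvG l (i - 1)] ++ [pvG l i]) (pvD l i) hk h1 hi hdi (by simp)
          rw [← hf]
          simpa using this
        · rw [pvF_break_neg l acc [pvG l (i - 1)] former i h1 hi hdi hf]
          have := hQ i (pvFlushA acc [pvG l (i - 1)]) [pvG l (i - 1), pvG l i] (pvD l i)
            hk h1 hi hdi (by simp)
          rw [this]
          rw [pvFlushA_single_then_big acc _ (pvG l (i - 1))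
            (le_trans (by simp) (pvRunB_len l (pvD l i) [pvG l (i - 1), pvG l i] i))]
      · rw [pvF_break_ge l acc [pvG l (i - 1)] former i h1 hi (by omega)]
        have hs := ihS (i + 1) (pvFlushA acc [pvG l (i - 1)]) former (by omega) (by omega)
          (by omega)
        rw [show i + 1 - 1 = i from rfl] at hs
        rw [hs]
        have hsingle := pvLoopB_single l acc (i - 1) (by omega)
          (by rw [hei]; exact fun hcc => hdi hcc.2)
        rw [hei] at hsingle
        rw [hsingle]
    · have hieq : i = l.length := by omega
      subst hieq
      exact pvS_base l acc former (by omega)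

theorem f_eq_chain (str : String) (h : 2 ≤ str.toList.length) :
    f str = String.ofList (pvLoopB (((PySem.Str.slice? str none none (-1)).getD "").toList) [] 0) := by
  unfold f
  simp only [PySem.Str.slice?_none_none_neg_one, Option.getD_some]
  have hlen : (String.ofList str.toList.reverse).toList.length = str.toList.length := by
    simp
  rw [if_neg (by omega)]
  set l := (String.ofList str.toList.reverse).toList with hl
  have h2 : 2 ≤ l.length := by omega
  have htemp : [PySem.List.pyGetD l 0 ' '] = [pvG l 0] := by
    simp [PySem.List.pyGetD_zero, pvG]
  have hformer : ((PySem.List.pyGetD l 1 ' ').toNat : Int)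
      - ((PySem.List.pyGetD l 0 ' ').toNat : Int) = pvD l 1 := by
    rw [show (1 : Int) = ((1 : Nat) : Int) from rfl, pvGetD_cast]
    simp [PySem.List.pyGetD_zero, pvD, pvG]
  rw [htemp, hformer]
  have := (pvMain l (l.length - 1)).2 1 [] (pvD l 1) (by omega) le_rfl (by omega)
  rw [show (1 : Nat) - 1 = 0 from rfl] at this
  exact congrArg String.ofList this

-- ===== the canonical ordered candidate list and B's staged construction =====

-- end of the maximal constant-delta run of value v whose scan stands at char j
def pvEnd (l : List Char) (v : Int) (j : Nat) : Nat :=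
  if j + 1 < l.length ∧ pvD l (j + 1) = v then pvEnd l v (j + 1) else j
termination_by l.length - j
decreasing_by omega

-- the window of characters i..j
def pvWin (l : List Char) (i j : Nat) : List Char :=
  (List.range (j + 1 - i)).map (fun t => pvG l (i + t))

-- the run candidate starting at char i
def pvCand (l : List Char) (i : Nat) : List Char :=
  pvWin l i (pvEnd l (pvD l (i + 1)) (i + 1))

-- the candidate list in scan order: at each position a maximal descending run, a single, or nothing
def pvCanon (l : List Char) (i : Nat) : List (Int × List Char) :=
  if i < l.length then
    if i + 1 < l.length ∧ pvD l (i + 1) < 0 ∧ (i = 0 ∨ pvD l i ≠ pvD l (i + 1)) then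
      ((i : Int), pvCand l i) :: pvCanon l (i + 1)
    else if i + 1 = l.length ∨ 0 ≤ pvD l (i + 1) then
      ((i : Int), [pvG l i]) :: pvCanon l (i + 1)
    else pvCanon l (i + 1)
  else []
termination_by l.length - i
decreasing_by all_goals omega

-- delta-run boundaries at d-index k and beyond (d[k] compared with d[k-1] is pvD (k+1) vs pvD k)
def pvBnds (l : List Char) (k : Nat) : List Nat :=
  if k < l.length - 1 then
    if k = 0 ∨ pvD l (k + 1) ≠ pvD l k then k :: pvBnds l (k + 1) else pvBnds l (k + 1)
  else []
termination_by l.length - 1 - k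
decreasing_by all_goals omega

-- the boundary list as Python ints
def pvCastL (xs : List Nat) : List Int := xs.map (fun a => (a : Int))

theorem pvCastL_nil : pvCastL [] = [] := rfl

theorem pvCastL_cons (a : Nat) (xs : List Nat) : pvCastL (a :: xs) = (a : Int) :: pvCastL xs := rfl

-- the run candidates generated by a boundary list
def pvRunsL (l : List Char) : List Nat → List (Int × List Char)
  | [] => []
  | a :: rest =>
    if pvD l (a + 1) < 0 then ((a : Int), pvCand l a) :: pvRunsL l rest else pvRunsL l rest

theorem pvRunsL_nil (l : List Char) : pvRunsL l [] = [] := rfl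

theorem pvRunsL_cons (l : List Char) (a : Nat) (rest : List Nat) :
    pvRunsL l (a :: rest)
      = if pvD l (a + 1) < 0 then ((a : Int), pvCand l a) :: pvRunsL l rest
        else pvRunsL l rest := rfl

-- the single-character candidates from position i on
def pvSinglesL (l : List Char) (i : Nat) : List (Int × List Char) :=
  if i < l.length then
    if i + 1 = l.length ∨ 0 ≤ pvD l (i + 1) then
      ((i : Int), [pvG l i]) :: pvSinglesL l (i + 1)
    else pvSinglesL l (i + 1)
  else []
termination_by l.length - i
decreasing_by all_goals omega

-- properties of pvEnd
theorem pvEnd_cont (l : List Char) (v : Int) (j : Nat)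
    (h : j + 1 < l.length ∧ pvD l (j + 1) = v) : pvEnd l v j = pvEnd l v (j + 1) := by
  rw [pvEnd]; rw [if_pos h]

theorem pvEnd_halt (l : List Char) (v : Int) (j : Nat)
    (h : ¬ (j + 1 < l.length ∧ pvD l (j + 1) = v)) : pvEnd l v j = j := by
  rw [pvEnd]; rw [if_neg h]

theorem pvEnd_ge (l : List Char) (v : Int) (j : Nat) : j ≤ pvEnd l v j := by
  fun_induction pvEnd l v j with
  | case1 _ _ ih => omega
  | case2 => omega

theorem pvEnd_lt (l : List Char) (v : Int) (j : Nat) (hj : j < l.length) :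
    pvEnd l v j < l.length := by
  fun_induction pvEnd l v j with
  | case1 _ h ih => exact ih (by omega)
  | case2 => omega

theorem pvEnd_const (l : List Char) (v : Int) (j : Nat) :
    ∀ t, j ≤ t → t < pvEnd l v j → pvD l (t + 1) = v := by
  fun_induction pvEnd l v j with
  | case1 j h ih =>
    intro t h1 h2
    by_cases ht : t = j
    · subst ht; exact h.2
    · exact ih t (by omega) h2
  | case2 j h => intro t h1 h2; omega

theorem pvEnd_stop (l : List Char) (v : Int) (j : Nat) :
    ¬ (pvEnd l v j + 1 < l.length ∧ pvD l (pvEnd l v j + 1) = v) := by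
  fun_induction pvEnd l v j with
  | case1 _ _ ih => exact ih
  | case2 j h => exact h

-- pvEnd from the run value and the delta constancy up to a stopping point
theorem pvEnd_eq (l : List Char) (v : Int) (e : Nat) (helt : e < l.length)
    (hstop : ¬ (e + 1 < l.length ∧ pvD l (e + 1) = v)) :
    ∀ fuel j, e - j ≤ fuel → j ≤ e → (∀ t, j ≤ t → t < e → pvD l (t + 1) = v) →
      pvEnd l v j = e := by
  intro fuel
  induction fuel with
  | zero =>
    intro j hf hje _
    have : j = e := by omega
    subst this
    exact pvEnd_halt l v j hstop
  | succ fuel ih =>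
    intro j hf hje hconst
    by_cases hj : j = e
    · subst hj; exact pvEnd_halt l v j hstop
    · have he : j + 1 ≤ e := by omega
      have hcont : j + 1 < l.length ∧ pvD l (j + 1) = v := by
        refine ⟨by omega, hconst j le_rfl (by omega)⟩
      rw [pvEnd_cont l v j hcont]
      exact ih (j + 1) (by omega) he (fun t h1 h2 => hconst t (by omega) h2)

-- pvWin facts
theorem pvWin_succ (l : List Char) (i j : Nat) (h : i ≤ j) :
    pvWin l i j ++ [pvG l (j + 1)] = pvWin l i (j + 1) := by
  unfold pvWin
  rw [show j + 1 + 1 - i = (j + 1 - i) + 1 by omega, List.range_succ, List.map_append]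
  simp only [List.map_cons, List.map_nil]
  rw [show i + (j + 1 - i) = j + 1 by omega]

theorem pvWin_pair (l : List Char) (i : Nat) :
    pvWin l i (i + 1) = [pvG l i, pvG l (i + 1)] := by
  unfold pvWin
  rw [show i + 1 + 1 - i = 2 by omega]
  simp [List.range_succ]

theorem pvWin_len (l : List Char) (i j : Nat) (h : i ≤ j) : (pvWin l i j).length = j + 1 - i := by
  simp [pvWin]

-- the chain's inner scan computes exactly the window up to pvEnd
theorem pvRunB_win (l : List Char) (v : Int) (i : Nat) :
    ∀ fuel j, l.length - j ≤ fuel → i ≤ j →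
      pvRunB l v (pvWin l i j) j = (pvWin l i (pvEnd l v j), pvEnd l v j) := by
  intro fuel
  induction fuel with
  | zero =>
    intro j hf hij
    have hc : ¬ (j + 1 < l.length ∧ pvD l (j + 1) = v) := by omega
    rw [pvRunB_stop l v _ j hc, pvEnd_halt l v j hc]
  | succ fuel ih =>
    intro j hf hij
    by_cases hc : j + 1 < l.length ∧ pvD l (j + 1) = v
    · rw [pvRunB_cont l v _ j hc.1 hc.2, pvWin_succ l i j hij]
      rw [ih (j + 1) (by omega) (by omega)]
      rw [pvEnd_cont l v j hc]
    · rw [pvRunB_stop l v _ j hc, pvEnd_halt l v j hc]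

-- the slice a..e+1 of the reversed string is the window a..e
theorem pvSlice_win (l : List Char) (a e : Nat) (ha : a ≤ e) (he : e < l.length) :
    PySem.List.slice l (some (a : Int)) (some ((e : Int) + 1)) = pvWin l a e := by
  rw [show ((e : Int) + 1) = ((e + 1 : Nat) : Int) by omega, PySem.List.slice_natCast]
  apply List.ext_getElem
  · rw [List.length_take, List.length_drop, pvWin_len l a e ha]; omega
  · intro t h1 h2
    rw [List.getElem_take, List.getElem_drop]
    simp only [pvWin, List.getElem_map, List.getElem_range]
    rw [show pvG l (a + t) = l[a + t]'(by rw [List.length_take, List.length_drop] at h1; omega)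
      from List.getD_eq_getElem l ' ' (by rw [List.length_take, List.length_drop] at h1; omega)]

-- ===== the chain equals the fold over the canonical list =====

theorem pvCanon_end (l : List Char) (i : Nat) (h : l.length <= i) : pvCanon l i = [] := by
  rw [pvCanon]; rw [if_neg (by omega)]

theorem pvCanon_skip (l : List Char) (k : Nat) (hk : 1 ≤ k)
    (h : k + 1 < l.length ∧ pvD l k < 0 ∧ pvD l (k + 1) = pvD l k) :
    pvCanon l k = pvCanon l (k + 1) := by
  rw [pvCanon]
  rw [if_pos (by omega)]
  rw [if_neg (by
    rintro ⟨-, -, h3 | h3⟩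
    · omega
    · exact h3 h.2.2.symm)]
  rw [if_neg (by push_neg; constructor <;> omega)]

theorem pvCanon_run (l : List Char) (i : Nat) (h : i < l.length)
    (hc : i + 1 < l.length ∧ pvD l (i + 1) < 0 ∧ (i = 0 ∨ pvD l i ≠ pvD l (i + 1))) :
    pvCanon l i = ((i : Int), pvCand l i) :: pvCanon l (i + 1) := by
  rw [pvCanon]; rw [if_pos h, if_pos hc]

theorem pvCanon_single (l : List Char) (i : Nat) (h : i < l.length)
    (hc : i + 1 = l.length ∨ 0 ≤ pvD l (i + 1)) :
    pvCanon l i = ((i : Int), [pvG l i]) :: pvCanon l (i + 1) := by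
  rw [pvCanon]
  rw [if_pos h, if_neg (by rintro ⟨h1, h2, -⟩; rcases hc with hc | hc <;> omega), if_pos hc]

-- skipping all interior positions of a run
theorem pvCanon_skip_to (l : List Char) (v : Int) (i : Nat) (hv : v < 0)
    (hvi : pvD l (i + 1) = v) (hE : pvEnd l v (i + 1) < l.length) :
    ∀ fuel k, pvEnd l v (i + 1) - k ≤ fuel → i + 1 ≤ k → k ≤ pvEnd l v (i + 1) →
      pvCanon l k = pvCanon l (pvEnd l v (i + 1)) := by
  intro fuel
  induction fuel with
  | zero =>
    intro k hf h1 h2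
    have : k = pvEnd l v (i + 1) := by omega
    rw [this]
  | succ fuel ih =>
    intro k hf h1 h2
    by_cases hk : k = pvEnd l v (i + 1)
    · rw [hk]
    · have hkE : k < pvEnd l v (i + 1) := by omega
      have hd1 : pvD l (k + 1) = v := pvEnd_const l v (i + 1) k h1 hkE
      have hdk : pvD l k = v := by
        by_cases hki : k = i + 1
        · rw [hki]; exact hvi
        · have := pvEnd_const l v (i + 1) (k - 1) (by omega) (by omega)
          rw [show k - 1 + 1 = k by omega] at this
          exact this
      rw [pvCanon_skip l k (by omega) ⟨by omega, by omega, by rw [hd1, hdk]⟩]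
      exact ih (k + 1) (by omega) (by omega) (by omega)

-- A's chain = fold of the keep-best step over the canonical candidate list
theorem pvChain_canon (l : List Char) (fuel : Nat) :
    ∀ i best, l.length - i ≤ fuel →
      (i = 0 ∨ ¬ (i + 1 < l.length ∧ pvD l i < 0 ∧ pvD l (i + 1) = pvD l i)) →
      pvLoopB l best i = (pvCanon l i).foldl (fun b p => pvFlushA b p.2) best := by
  induction fuel with
  | zero =>
    intro i best hk _
    rw [pvLoopB_end l best i (by omega), pvCanon_end l i (by omega)]
    rfl
  | succ fuel ih =>
    intro i best hk hreach
    by_cases hi : i < l.length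
    · by_cases hc : i + 1 < l.length ∧ pvD l (i + 1) < 0
      · -- run branch
        set v := pvD l (i + 1) with hv
        have hstart : i = 0 ∨ pvD l i ≠ pvD l (i + 1) := by
          rcases hreach with h0 | hnint
          · exact Or.inl h0
          · right; intro heq
            exact hnint ⟨hc.1, by omega, by omega⟩
        rw [pvLoopB_run l best i hi hc.1 hc.2]
        have hwin := pvRunB_win l v i l.length (i + 1) (by omega) (by omega)
        rw [pvWin_pair l i] at hwin
        rw [hwin]
        set E := pvEnd l v (i + 1) with hE
        have hEge : i + 1 ≤ E := pvEnd_ge l v (i + 1)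
        have hElt : E < l.length := pvEnd_lt l v (i + 1) hc.1
        have hstop := pvEnd_stop l v (i + 1)
        rw [pvCanon_run l i hi ⟨hc.1, hc.2, hstart⟩]
        simp only [List.foldl_cons]
        have hskip := pvCanon_skip_to l v i hc.2 hv.symm hElt (E - (i + 1)) (i + 1) (by omega) le_rfl hEge
        rw [hskip]
        have hEd : pvD l E = v := by
          by_cases hEi : E = i + 1
          · rw [hEi, ← hv]
          · have := pvEnd_const l v (i + 1) (E - 1) (by omega) (by omega)
            rw [show E - 1 + 1 = E by omega] at this
            exact this
        have hreach' : E = 0 ∨ ¬ (E + 1 < l.length ∧ pvD l E < 0 ∧ pvD l (E + 1) = pvD l E) := by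
          right; rintro ⟨h1, h2, h3⟩
          exact hstop ⟨h1, by rw [h3, hEd]⟩
        exact ih E (pvFlushA best (pvCand l i)) (by omega) hreach'
      · -- single branch
        have hsing : i + 1 = l.length ∨ 0 ≤ pvD l (i + 1) := by
          by_cases h1 : i + 1 < l.length
          · right; by_contra hneg; exact hc ⟨h1, by omega⟩
          · left; omega
        rw [pvLoopB_single l best i hi hc]
        rw [pvCanon_single l i hi hsing]
        simp only [List.foldl_cons]
        have hreach' : i + 1 = 0 ∨ ¬ (i + 1 + 1 < l.length ∧ pvD l (i + 1) < 0 ∧ pvD l (i + 1 + 1) = pvD l (i + 1)) := by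
          right; rintro ⟨h1, h2, h3⟩
          rcases hsing with h4 | h4 <;> omega
        exact ih (i + 1) (pvFlushA best [pvG l i]) (by omega) hreach'
    · rw [pvLoopB_end l best i (by omega), pvCanon_end l i (by omega)]
      rfl

-- ===== the canonical list is B's sorted candidate list =====

theorem pvSinglesL_end (l : List Char) (i : Nat) (h : l.length ≤ i) : pvSinglesL l i = [] := by
  rw [pvSinglesL]; rw [if_neg (by omega)]

theorem pvBnds_end (l : List Char) (k : Nat) (h : l.length - 1 ≤ k) : pvBnds l k = [] := by
  rw [pvBnds]; rw [if_neg (by omega)]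

theorem pvSinglesL_cons (l : List Char) (i : Nat) (h : i < l.length)
    (hc : i + 1 = l.length ∨ 0 ≤ pvD l (i + 1)) :
    pvSinglesL l i = ((i : Int), [pvG l i]) :: pvSinglesL l (i + 1) := by
  rw [pvSinglesL]; rw [if_pos h, if_pos hc]

theorem pvSinglesL_skip (l : List Char) (i : Nat) (h : i < l.length)
    (hc : ¬ (i + 1 = l.length ∨ 0 ≤ pvD l (i + 1))) :
    pvSinglesL l i = pvSinglesL l (i + 1) := by
  rw [pvSinglesL]; rw [if_pos h, if_neg hc]

theorem pvBnds_cons (l : List Char) (k : Nat) (h : k < l.length - 1)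
    (hp : k = 0 ∨ pvD l (k + 1) ≠ pvD l k) :
    pvBnds l k = k :: pvBnds l (k + 1) := by
  rw [pvBnds]; rw [if_pos h, if_pos hp]

theorem pvBnds_skip (l : List Char) (k : Nat) (h : k < l.length - 1)
    (hp : ¬ (k = 0 ∨ pvD l (k + 1) ≠ pvD l k)) :
    pvBnds l k = pvBnds l (k + 1) := by
  rw [pvBnds]; rw [if_pos h, if_neg hp]

-- the permutation: canonical list ~ runs ++ singles
theorem pvCanon_perm (l : List Char) (fuel : Nat) :
    ∀ i, l.length - i ≤ fuel →
      (pvCanon l i).Perm (pvRunsL l (pvBnds l i) ++ pvSinglesL l i) := by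
  induction fuel with
  | zero =>
    intro i hk
    rw [pvCanon_end l i (by omega), pvSinglesL_end l i (by omega), pvBnds_end l i (by omega)]
    rfl
  | succ fuel ih =>
    intro i hk
    by_cases hi : i < l.length
    · by_cases hrs : i + 1 < l.length ∧ pvD l (i + 1) < 0 ∧ (i = 0 ∨ pvD l i ≠ pvD l (i + 1))
      · -- run start: heads both lists
        rw [pvCanon_run l i hi hrs]
        have hb : pvBnds l i = i :: pvBnds l (i + 1) := by
          rw [pvBnds]
          rw [if_pos (by omega),
              if_pos (hrs.2.2.imp id Ne.symm)]
        rw [hb]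
        have hs : pvSinglesL l i = pvSinglesL l (i + 1) := by
          rw [pvSinglesL]
          rw [if_pos hi, if_neg (by rintro (h | h) <;> omega)]
        rw [hs]
        simp only [pvRunsL]
        rw [if_pos hrs.2.1]
        rw [List.cons_append]
        exact (ih (i + 1) (by omega)).cons _
      · by_cases hsg : i + 1 = l.length ∨ 0 ≤ pvD l (i + 1)
        · -- single: head of singles, runs unchanged (a non-descending boundary is dropped)
          rw [pvCanon_single l i hi hsg]
          have hs : pvSinglesL l i = ((i : Int), [pvG l i]) :: pvSinglesL l (i + 1) := by
            rw [pvSinglesL]; rw [if_pos hi, if_pos hsg]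
          have hr : pvRunsL l (pvBnds l i) = pvRunsL l (pvBnds l (i + 1)) := by
            by_cases hb1 : i < l.length - 1
            · by_cases hp : i = 0 ∨ pvD l (i + 1) ≠ pvD l i
              · rw [pvBnds, if_pos hb1, if_pos hp]
                simp only [pvRunsL]
                rw [if_neg (by rcases hsg with h | h <;> omega)]
              · rw [pvBnds, if_pos hb1, if_neg hp]
            · rw [pvBnds, if_neg hb1, pvBnds_end l (i + 1) (by omega)]
          rw [hs, hr]
          exact ((ih (i + 1) (by omega)).cons _).trans (List.perm_middle.symm)
        · -- interior: all three lists unchanged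
          have hd1 : pvD l (i + 1) < 0 := by
            rcases Int.lt_or_le (pvD l (i + 1)) 0 with h | h
            · exact h
            · exact absurd (Or.inr h) hsg
          have hi1 : i + 1 < l.length := by
            rcases Nat.lt_or_ge (i + 1) l.length with h | h
            · exact h
            · exact absurd (Or.inl (by omega)) hsg
          have hne0 : i ≠ 0 := by
            intro h0
            exact hrs ⟨hi1, hd1, Or.inl h0⟩
          have heq : pvD l i = pvD l (i + 1) := by
            by_contra hne
            exact hrs ⟨hi1, hd1, Or.inr hne⟩
          have hcn : pvCanon l i = pvCanon l (i + 1) := by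
            rw [pvCanon]
            rw [if_pos hi, if_neg hrs, if_neg hsg]
          have hs : pvSinglesL l i = pvSinglesL l (i + 1) := by
            rw [pvSinglesL]; rw [if_pos hi, if_neg hsg]
          have hb : pvBnds l i = pvBnds l (i + 1) := by
            rw [pvBnds]
            rw [if_pos (by omega), if_neg (by push_neg; exact ⟨hne0, heq.symm⟩)]
          rw [hcn, hs, hb]
          exact ih (i + 1) (by omega)
    · rw [pvCanon_end l i (by omega), pvSinglesL_end l i (by omega), pvBnds_end l i (by omega)]
      rfl

-- keys of the canonical list are ≥ i and strictly increasing
theorem pvCanon_key_lb (l : List Char) (fuel : Nat) :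
    ∀ i, l.length - i ≤ fuel → ∀ p ∈ pvCanon l i, (i : Int) ≤ p.1 := by
  induction fuel with
  | zero =>
    intro i hk p hp
    rw [pvCanon_end l i (by omega)] at hp
    simp at hp
  | succ fuel ih =>
    intro i hk p hp
    by_cases hi : i < l.length
    · rw [pvCanon] at hp
      rw [if_pos hi] at hp
      split_ifs at hp with h1 h2
      · rcases List.mem_cons.mp hp with h | h
        · rw [h]
        · have := ih (i + 1) (by omega) p h; omega
      · rcases List.mem_cons.mp hp with h | h
        · rw [h]
        · have := ih (i + 1) (by omega) p h; omega
      · have := ih (i + 1) (by omega) p hp; omega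
    · rw [pvCanon_end l i (by omega)] at hp
      simp at hp

theorem pvCanon_pairwise (l : List Char) (fuel : Nat) :
    ∀ i, l.length - i ≤ fuel →
      (pvCanon l i).Pairwise (fun p q : Int × List Char => p.1 < q.1) := by
  induction fuel with
  | zero =>
    intro i hk
    rw [pvCanon_end l i (by omega)]
    exact List.Pairwise.nil
  | succ fuel ih =>
    intro i hk
    by_cases hi : i < l.length
    · rw [pvCanon]
      rw [if_pos hi]
      have hnext := ih (i + 1) (by omega)
      have hlb : ∀ p ∈ pvCanon l (i + 1), ((i : Int)) < p.1 := fun p hp => by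
        have := pvCanon_key_lb l (l.length - (i + 1)) (i + 1) le_rfl p hp
        omega
      split_ifs with h1 h2
      · exact List.pairwise_cons.mpr ⟨hlb, hnext⟩
      · exact List.pairwise_cons.mpr ⟨hlb, hnext⟩
      · exact hnext
    · rw [pvCanon_end l i (by omega)]
      exact List.Pairwise.nil

-- ----- linking B's concrete lists to pvBnds / pvRunsL / pvSinglesL -----

-- the port's delta list evaluated at an in-range index
theorem pvDList (l : List Char) (i : Nat) (hi : i < l.length - 1) :
    PySem.List.pyGetD
      ((PySem.List.pyRange 0 ((l.length : Int) - 1) 1).map (fun k =>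
        ((PySem.List.pyGetD l (k + 1) ' ').toNat : Int) - ((PySem.List.pyGetD l k ' ').toNat : Int)))
      (i : Int) 0 = pvD l (i + 1) := by
  rw [show ((l.length : Int) - 1) = ((l.length - 1 : Nat) : Int) by omega]
  rw [PySem.List.pyGetD_map_pyRange _ (l.length - 1) i 0 hi]
  rw [pvGetD_cast_add, pvGetD_cast]
  rfl

-- B's singles comprehension is pvSinglesL
theorem pvSingles_link (l : List Char) (fuel : Nat) :
    ∀ i, l.length - i ≤ fuel → i ≤ l.length →
      (((PySem.List.pyRange (i : Int) (l.length : Int) 1).filter (fun j =>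
          decide (j + 1 = (l.length : Int) ∨ 0 ≤ PySem.List.pyGetD
            ((PySem.List.pyRange 0 ((l.length : Int) - 1) 1).map (fun k =>
              ((PySem.List.pyGetD l (k + 1) ' ').toNat : Int) - ((PySem.List.pyGetD l k ' ').toNat : Int)))
            j 0))).map
        (fun j => (j, [PySem.List.pyGetD l j ' ']))) = pvSinglesL l i := by
  induction fuel with
  | zero =>
    intro i hk hle
    have hi : i = l.length := by omega
    subst hi
    rw [PySem.List.pyRange_one_eq_nil le_rfl, pvSinglesL_end l l.length le_rfl]
    rfl
  | succ fuel ih =>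
    intro i hk hle
    by_cases hi : i < l.length
    · rw [PySem.List.pyRange_one_cons (a := (i : Int)) (b := (l.length : Int)) (by exact_mod_cast hi)]
      rw [show ((i : Int) + 1) = ((i + 1 : Nat) : Int) by omega]
      rw [List.filter_cons]
      by_cases hc : i + 1 = l.length ∨ 0 ≤ pvD l (i + 1)
      · rw [if_pos (by
          simp only [decide_eq_true_eq]
          by_cases hiN : i + 1 = l.length
          · left
            rw [show ((i : Int) + 1) = ((i + 1 : Nat) : Int) by omega]
            exact_mod_cast congrArg (Nat.cast : Nat → Int) hiN
          · right
            rw [pvDList l i (by omega)]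
            rcases hc with hc | hc
            · exact absurd hc hiN
            · exact hc)]
        rw [List.map_cons]
        rw [ih (i + 1) (by omega) (by omega)]
        rw [pvSinglesL_cons l i hi hc, pvGetD_cast]
      · have hi1 : i + 1 < l.length := by
          rcases Nat.lt_or_ge (i + 1) l.length with h | h
          · exact h
          · exact absurd (by omega : i + 1 = l.length) (fun he => hc (Or.inl he))
        rw [if_neg (by
          simp only [decide_eq_true_eq]
          push_neg
          constructor
          · intro he
            rw [show ((i : Int) + 1) = ((i + 1 : Nat) : Int) by omega] at he
            exact absurd (by exact_mod_cast he : i + 1 = l.length) (fun x => hc (Or.inl x))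
          · rw [pvDList l i (by omega)]
            push_neg at hc
            omega)]
        rw [ih (i + 1) (by omega) (by omega)]
        rw [pvSinglesL_skip l i hi hc]
    · have hieq : i = l.length := by omega
      subst hieq
      rw [PySem.List.pyRange_one_eq_nil le_rfl, pvSinglesL_end l l.length le_rfl]
      rfl

-- B's starts comprehension is pvBnds
theorem pvStarts_link (l : List Char) (hn : 1 ≤ l.length) (fuel : Nat) :
    ∀ k, l.length - 1 - k ≤ fuel → k ≤ l.length - 1 →
      ((PySem.List.pyRange (k : Int) ((l.length : Int) - 1) 1).filter (fun j =>
          decide (j = 0 ∨ PySem.List.pyGetD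
              ((PySem.List.pyRange 0 ((l.length : Int) - 1) 1).map (fun t =>
                ((PySem.List.pyGetD l (t + 1) ' ').toNat : Int) - ((PySem.List.pyGetD l t ' ').toNat : Int)))
              j 0 ≠ PySem.List.pyGetD
              ((PySem.List.pyRange 0 ((l.length : Int) - 1) 1).map (fun t =>
                ((PySem.List.pyGetD l (t + 1) ' ').toNat : Int) - ((PySem.List.pyGetD l t ' ').toNat : Int)))
              (j - 1) 0)))
        = pvCastL (pvBnds l k) := by
  induction fuel with
  | zero =>
    intro k hk hle
    have : k = l.length - 1 := by omega
    subst this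
    rw [show ((l.length : Int) - 1) = ((l.length - 1 : Nat) : Int) by omega]
    rw [PySem.List.pyRange_one_eq_nil le_rfl, pvBnds_end l (l.length - 1) le_rfl]
    rfl
  | succ fuel ih =>
    intro k hk hle
    by_cases hklt : k < l.length - 1
    · rw [show ((l.length : Int) - 1) = ((l.length - 1 : Nat) : Int) by omega]
      rw [PySem.List.pyRange_one_cons (a := (k : Int)) (b := ((l.length - 1 : Nat) : Int))
        (by exact_mod_cast hklt)]
      rw [show ((k : Int) + 1) = ((k + 1 : Nat) : Int) by omega]
      rw [List.filter_cons]
      rw [show (((l.length - 1 : Nat) : Int)) = ((l.length : Int) - 1) by omega]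
      by_cases hp : k = 0 ∨ pvD l (k + 1) ≠ pvD l k
      · rw [if_pos (by
          simp only [decide_eq_true_eq]
          by_cases hk0 : k = 0
          · left
            exact_mod_cast congrArg (Nat.cast : Nat → Int) hk0
          · right
            have hpk : pvD l (k + 1) ≠ pvD l k := by
              rcases hp with hp | hp
              · exact absurd hp hk0
              · exact hp
            rw [pvDList l k hklt]
            rw [show ((k : Int) - 1) = ((k - 1 : Nat) : Int) by omega]
            rw [pvDList l (k - 1) (by omega)]
            rw [show k - 1 + 1 = k by omega]
            exact hpk)]
        rw [ih (k + 1) (by omega) (by omega)]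
        rw [pvBnds_cons l k hklt hp, pvCastL_cons]
      · push_neg at hp
        have hk1 : 1 ≤ k := by
          by_contra h0
          exact hp.1 (by omega)
        rw [if_neg (by
          simp only [decide_eq_true_eq]
          push_neg
          constructor
          · intro he
            exact absurd (by exact_mod_cast he : k = 0) (by omega)
          · rw [pvDList l k hklt]
            rw [show ((k : Int) - 1) = ((k - 1 : Nat) : Int) by omega]
            rw [pvDList l (k - 1) (by omega)]
            rw [show k - 1 + 1 = k by omega]
            exact hp.2)]
        rw [ih (k + 1) (by omega) (by omega)]
        rw [pvBnds_skip l k hklt (by push_neg; exact ⟨hp.1, hp.2⟩)]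
    · rw [show ((l.length : Int) - 1) = ((l.length - 1 : Nat) : Int) by omega]
      rw [PySem.List.pyRange_one_eq_nil (a := (k : Int)) (b := ((l.length - 1 : Nat) : Int))
        (by exact_mod_cast (by omega : l.length - 1 ≤ k))]
      rw [pvBnds_end l k (by omega)]
      rfl

-- gap property of pvBnds: no boundary strictly inside a gap
theorem pvBnds_nil_gap (l : List Char) (fuel : Nat) :
    ∀ j, l.length - 1 - j ≤ fuel → pvBnds l j = [] →
      ∀ t, j ≤ t → t < l.length - 1 → ¬ (t = 0 ∨ pvD l (t + 1) ≠ pvD l t) := by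
  induction fuel with
  | zero => intro j hk hnil t h1 h2; omega
  | succ fuel ih =>
    intro j hk hnil t h1 h2
    rw [pvBnds] at hnil
    by_cases hj : j < l.length - 1
    · rw [if_pos hj] at hnil
      by_cases hp : j = 0 ∨ pvD l (j + 1) ≠ pvD l j
      · rw [if_pos hp] at hnil
        exact absurd hnil (by simp)
      · rw [if_neg hp] at hnil
        by_cases ht : t = j
        · subst ht; exact hp
        · exact ih (j + 1) (by omega) hnil t (by omega) h2
    · omega

theorem pvBnds_cons_props (l : List Char) (fuel : Nat) :
    ∀ j e rest, l.length - 1 - j ≤ fuel → pvBnds l j = e :: rest →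
      j ≤ e ∧ e < l.length - 1 ∧ (e = 0 ∨ pvD l (e + 1) ≠ pvD l e) ∧
        (∀ t, j ≤ t → t < e → ¬ (t = 0 ∨ pvD l (t + 1) ≠ pvD l t)) ∧
        rest = pvBnds l (e + 1) := by
  induction fuel with
  | zero =>
    intro j e rest hk hcons
    rw [pvBnds_end l j (by omega)] at hcons
    exact absurd hcons (by simp)
  | succ fuel ih =>
    intro j e rest hk hcons
    by_cases hj : j < l.length - 1
    · by_cases hp : j = 0 ∨ pvD l (j + 1) ≠ pvD l j
      · have hstep : pvBnds l j = j :: pvBnds l (j + 1) := by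
          rw [pvBnds]; rw [if_pos hj, if_pos hp]
        rw [hstep] at hcons
        obtain ⟨he, hr⟩ := List.cons.inj hcons
        subst he
        refine ⟨le_rfl, hj, hp, ?_, hr.symm⟩
        intro t h1 h2
        omega
      · have hstep : pvBnds l j = pvBnds l (j + 1) := by
          rw [pvBnds]; rw [if_pos hj, if_neg hp]
        rw [hstep] at hcons
        obtain ⟨h1, h2, h3, h4, h5⟩ := ih (j + 1) e rest (by omega) hcons
        refine ⟨by omega, h2, h3, ?_, h5⟩
        intro t ht1 ht2
        by_cases htj : t = j
        · subst htj; exact hp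
        · exact h4 t (by omega) ht2
    · rw [pvBnds_end l j (by omega)] at hcons
      exact absurd hcons (by simp)

-- delta constancy across a boundary-free gap
theorem pvGap_const (l : List Char) (a e : Nat)
    (hgap : ∀ t, a + 1 ≤ t → t < e → ¬ (t = 0 ∨ pvD l (t + 1) ≠ pvD l t)) :
    ∀ t, a ≤ t → t < e → pvD l (t + 1) = pvD l (a + 1) := by
  intro t
  induction t with
  | zero => intro h1 h2; rw [show a = 0 by omega]
  | succ t iht =>
    intro h1 h2
    by_cases hta : t + 1 = a
    · rw [hta]
    · have hne := hgap (t + 1) (by omega) h2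
      push_neg at hne
      rw [hne.2]
      by_cases hta2 : t < a
      · omega
      · exact iht (by omega) (by omega)

-- the maximal run from boundary a stops exactly at the next boundary (or at the last character)
theorem pvEnd_boundary (l : List Char) (a e : Nat) (hae : a < e) (he : e + 1 ≤ l.length)
    (hgap : ∀ t, a + 1 ≤ t → t < e → ¬ (t = 0 ∨ pvD l (t + 1) ≠ pvD l t))
    (hstop : ¬ (e + 1 < l.length ∧ pvD l (e + 1) = pvD l (a + 1))) :
    pvEnd l (pvD l (a + 1)) (a + 1) = e := by
  refine pvEnd_eq l (pvD l (a + 1)) e (by omega) hstop (e - (a + 1)) (a + 1) le_rfl (by omega) ?_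
  intro t h1 h2
  exact pvGap_const l a e hgap t (by omega) h2

-- B's zipped runs comprehension is pvRunsL of the boundary list
theorem pvRuns_link (l : List Char) (hn : 2 ≤ l.length) (fuel : Nat) :
    ∀ k, l.length - 1 - k ≤ fuel → k ≤ l.length - 1 →
      ((((pvCastL (pvBnds l k)).zip
          (((pvCastL (pvBnds l k)).drop 1) ++ [(l.length : Int) - 1])).filter
          (fun p => decide (PySem.List.pyGetD
            ((PySem.List.pyRange 0 ((l.length : Int) - 1) 1).map (fun t =>
              ((PySem.List.pyGetD l (t + 1) ' ').toNat : Int) - ((PySem.List.pyGetD l t ' ').toNat : Int)))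
            p.1 0 < 0))).map
        (fun p => (p.1, PySem.List.slice l (some p.1) (some (p.2 + 1)))))
      = pvRunsL l (pvBnds l k) := by
  induction fuel with
  | zero =>
    intro k hk hle
    rw [pvBnds_end l k (by omega)]
    rfl
  | succ fuel ih =>
    intro k hk hle
    rcases hb : pvBnds l k with _ | ⟨a, rest⟩
    · rfl
    · obtain ⟨hka, haLt, hPa, hgapKa, hrest⟩ :=
        pvBnds_cons_props l (l.length - 1 - k) k a rest le_rfl hb
      have hih := ih (a + 1) (by omega) (by omega)
      rw [← hrest] at hih
      have hcand : ∀ e : Nat, a < e → e + 1 ≤ l.length →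
          (∀ t, a + 1 ≤ t → t < e → ¬ (t = 0 ∨ pvD l (t + 1) ≠ pvD l t)) →
          ¬ (e + 1 < l.length ∧ pvD l (e + 1) = pvD l (a + 1)) →
          PySem.List.slice l (some ((a : Nat) : Int)) (some (((e : Nat) : Int) + 1)) = pvCand l a := by
        intro e h1 h2 h3 h4
        rw [pvSlice_win l a e (by omega) (by omega)]
        unfold pvCand
        rw [pvEnd_boundary l a e h1 h2 h3 h4]
      rcases hr : rest with _ | ⟨e, rest2⟩
      · -- a is the last boundary: paired with n - 1
        subst hr
        have hgapN : ∀ t, a + 1 ≤ t → t < l.length - 1 → ¬ (t = 0 ∨ pvD l (t + 1) ≠ pvD l t) :=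
          pvBnds_nil_gap l (l.length - 1 - (a + 1)) (a + 1) le_rfl hrest.symm
        rw [pvCastL_cons, pvCastL_nil, List.drop_one, List.tail_cons, List.nil_append,
          List.zip_cons_cons, List.zip_nil_left, List.filter_cons]
        by_cases hneg : pvD l (a + 1) < 0
        · rw [if_pos (by simp only [decide_eq_true_eq]; rw [pvDList l a haLt]; exact hneg)]
          rw [List.filter_nil, List.map_cons, List.map_nil]
          rw [show ((l.length : Int) - 1) = ((l.length - 1 : Nat) : Int) by omega]
          rw [hcand (l.length - 1) (by omega) (by omega) hgapN (by omega)]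
          rw [pvRunsL_cons, if_pos hneg, pvRunsL_nil]
        · rw [if_neg (by simp only [decide_eq_true_eq]; rw [pvDList l a haLt]; omega)]
          rw [List.filter_nil, List.map_nil]
          rw [pvRunsL_cons, if_neg hneg, pvRunsL_nil]
      · -- the next boundary e exists: a is paired with e
        have hprops2 := pvBnds_cons_props l (l.length - 1 - (a + 1)) (a + 1) e rest2
          le_rfl (by rw [← hrest, hr])
        obtain ⟨hae, heLt, hPe, hgapAe, hrest2⟩ := hprops2
        have hstopE : ¬ (e + 1 < l.length ∧ pvD l (e + 1) = pvD l (a + 1)) := by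
          rintro ⟨h1, h2⟩
          have hDe : pvD l e = pvD l (a + 1) := by
            by_cases hea : e = a + 1
            · rw [hea]
            · have := pvGap_const l a e hgapAe (e - 1) (by omega) (by omega)
              rw [show e - 1 + 1 = e by omega] at this
              exact this
          rcases hPe with h3 | h3
          · omega
          · exact h3 (by rw [h2, hDe])
        subst hr
        rw [pvCastL_cons, List.drop_one, List.tail_cons, pvCastL_cons, List.cons_append,
          List.zip_cons_cons, List.filter_cons]
        rw [pvCastL_cons, List.drop_one, List.tail_cons] at hih
        by_cases hneg : pvD l (a + 1) < 0
        · rw [if_pos (by simp only [decide_eq_true_eq]; rw [pvDList l a haLt]; exact hneg)]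
          rw [List.map_cons]
          rw [hcand e (by omega) (by omega) hgapAe hstopE]
          rw [pvRunsL_cons, if_pos hneg, hih]
        · rw [if_neg (by simp only [decide_eq_true_eq]; rw [pvDList l a haLt]; omega)]
          rw [pvRunsL_cons, if_neg hneg, hih]

-- final assembly for B
theorem f_alt_eq (str : String) (h : 2 ≤ str.toList.length) :
    f_alt str = String.ofList ((pvCanon (((PySem.Str.slice? str none none (-1)).getD "").toList) 0).foldl
      (fun b p => pvFlushA b p.2) []) := by
  unfold f_alt
  simp only [PySem.Str.slice?_none_none_neg_one, Option.getD_some]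
  set l := (String.ofList str.toList.reverse).toList with hl
  have hlen : 2 ≤ l.length := by
    rw [hl]; simpa using h
  have hsingles := pvSingles_link l l.length 0 (by omega) (by omega)
  have hstarts := pvStarts_link l (by omega) (l.length - 1) 0 (by omega) (by omega)
  have hruns := pvRuns_link l hlen (l.length - 1) 0 (by omega) (by omega)
  rw [show ((0 : Nat) : Int) = (0 : Int) from rfl] at hsingles hstarts
  rw [hsingles, hstarts, hruns]
  have hperm := pvCanon_perm l l.length 0 (by omega)
  have hpair := pvCanon_pairwise l l.length 0 (by omega)
  have hsort : PySem.List.sorted (pvRunsL l (pvBnds l 0) ++ pvSinglesL l 0)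
      (fun p : Int × List Char => p.1) false = pvCanon l 0 :=
    PySem.List.sorted_eq_of_perm_of_pairwise_lt (pvRunsL l (pvBnds l 0) ++ pvSinglesL l 0)
      (pvCanon l 0) (fun p : Int × List Char => p.1) hperm hpair
  rw [hsort]
  rfl

-- ===== VERDICT (by name: the statement is the Claim_ definition above) =====
theorem f_spec : Claim_equal_f := by
  intro str _ hp
  show f str = f_alt str
  rw [f_eq_chain str hp, f_alt_eq str hp]
  set l := ((PySem.Str.slice? str none none (-1)).getD "").toList with hl
  have hlen : 2 ≤ l.length := by
    rw [hl]
    simp only [PySem.Str.slice?_none_none_neg_one, Option.getD_some]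
    simpa using hp
  rw [pvChain_canon l l.length 0 [] (by omega) (Or.inl rfl)]
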